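-- pv_equiv track=rewrite | github.com/xuezhou1998/leetcode | kclosest.py | xinsert
-- ===== SOURCE A (Python) =====
-- def xinsert(smlpts,elemt,fil,k):
--     # initlen=len(smlpts)
--     idx=-1
--     for i in range(len(smlpts)):
--         if elemt[0]<smlpts[i][0]:
--             idx=i
--             break
--
--     if idx==-1 and fil==False:
--         smlpts.append(elemt)
--         return smlpts
--     elif idx>=0:
--         smlpts.insert(idx,elemt)
--     return smlpts[:k]
-- ===== SOURCE B (Python) =====
-- # B: functional rebuild by structural recursion (no index arithmetic, no in-place
-- # mutation -- equivalence is about the return value; A mutates its input list).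
-- def xinsert(smlpts, elemt, fil, k):
--     def go(lst):
--         # returns the list with elemt inserted before the first strictly greater
--         # first coordinate, or None if no such position exists
--         if not lst:
--             return None
--         if elemt[0] < lst[0][0]:
--             return [elemt] + lst
--         rest = go(lst[1:])
--         return None if rest is None else [lst[0]] + rest
--     r = go(smlpts)
--     if r is None:
--         if not fil:
--             return smlpts + [elemt]
--         return smlpts[:k]
--     return r[:k]
-- ===== Notes on version B (the rewrite author's own statement) =====
-- stated objective: alternative
-- what changed: Replaced the index-scan over range(len) plus in-place insert/append/slice with a single structural recursion that rebuilds the list with the element inserted before the first strictly greater first coordinate (B does not mutate its argument; return values agree).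
import Mathlib
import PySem

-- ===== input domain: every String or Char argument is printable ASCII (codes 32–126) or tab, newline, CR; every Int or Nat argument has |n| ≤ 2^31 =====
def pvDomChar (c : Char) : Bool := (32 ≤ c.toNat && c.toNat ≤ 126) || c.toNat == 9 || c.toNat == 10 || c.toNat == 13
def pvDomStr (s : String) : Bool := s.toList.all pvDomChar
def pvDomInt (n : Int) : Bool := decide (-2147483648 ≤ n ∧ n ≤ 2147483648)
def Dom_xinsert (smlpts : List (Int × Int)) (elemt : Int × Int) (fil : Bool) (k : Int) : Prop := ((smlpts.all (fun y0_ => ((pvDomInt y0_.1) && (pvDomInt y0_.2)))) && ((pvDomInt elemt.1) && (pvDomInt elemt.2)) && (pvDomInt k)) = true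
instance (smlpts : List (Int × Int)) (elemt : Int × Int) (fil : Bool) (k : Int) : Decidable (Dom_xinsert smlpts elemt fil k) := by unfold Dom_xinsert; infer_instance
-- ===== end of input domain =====

-- B rebuilds the list by structural recursion instead of A's index scan + in-place
-- insert; equivalence is about the return value only (Python A mutates its argument).

-- ===== PORT A =====
-- the 'for i in range(len(smlpts)): if elemt[0] < smlpts[i][0]: idx = i; break' scan
def xfindA (x : Int) : List (Int × Int) → Int → Int
  | [], _ => -1
  | p :: rest, i => if x < p.1 then i else xfindA x rest (i + 1)

def xinsert (smlpts : List (Int × Int)) (elemt : Int × Int) (fil : Bool) (k : Int) : List (Int × Int) :=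
  let idx := xfindA elemt.1 smlpts 0
  if idx == -1 && fil == false then
    smlpts ++ [elemt]
  else if idx ≥ 0 then
    PySem.List.slice (PySem.List.insert smlpts idx elemt) none (some k)
  else
    PySem.List.slice smlpts none (some k)

-- ===== PORT B =====
-- Source B's helper go: inserted list, or none when no strictly greater key exists
def goB (e : Int × Int) : List (Int × Int) → Option (List (Int × Int))
  | [] => none
  | p :: rest => if e.1 < p.1 then some (e :: p :: rest) else (goB e rest).map (p :: ·)

def xinsert_alt (smlpts : List (Int × Int)) (elemt : Int × Int) (fil : Bool) (k : Int) : List (Int × Int) :=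
  match goB elemt smlpts with
  | none => if fil = false then smlpts ++ [elemt] else PySem.List.slice smlpts none (some k)
  | some r => PySem.List.slice r none (some k)

-- ===== PRECONDITION & SPEC =====
def Spec_xinsert (smlpts : List (Int × Int)) (elemt : Int × Int) (fil : Bool) (k : Int) (out : List (Int × Int)) : Prop := out = xinsert_alt smlpts elemt fil k
instance (smlpts : List (Int × Int)) (elemt : Int × Int) (fil : Bool) (k : Int) (out : List (Int × Int)) : Decidable (Spec_xinsert smlpts elemt fil k out) := by unfold Spec_xinsert; infer_instance

-- ===== CLAIM (what is proved, stated in full; the proofs are below) =====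
def Claim_equal_xinsert : Prop := ∀ (smlpts : List (Int × Int)) (elemt : Int × Int) (fil : Bool) (k : Int), Dom_xinsert smlpts elemt fil k → Spec_xinsert smlpts elemt fil k (xinsert smlpts elemt fil k)

-- ===== LEMMAS AND PROOFS =====

theorem xfindA_of_goB_none (e : Int × Int) (l : List (Int × Int)) (h : goB e l = none) :
    ∀ i : Int, xfindA e.1 l i = -1 := by
  induction l with
  | nil => intro i; rfl
  | cons p rest ih =>
    intro i
    simp only [goB] at h
    by_cases hc : e.1 < p.1
    · simp [hc] at h
    · simp only [if_neg hc, Option.map_eq_none_iff] at h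
      simp [xfindA, hc, ih h]

theorem xfindA_of_goB_some (e : Int × Int) (l : List (Int × Int)) (r : List (Int × Int))
    (h : goB e l = some r) :
    ∃ j : Nat, j ≤ l.length ∧ (∀ i : Int, xfindA e.1 l i = i + j) ∧
      r = l.take j ++ e :: l.drop j := by
  induction l generalizing r with
  | nil => simp [goB] at h
  | cons p rest ih =>
    simp only [goB] at h
    by_cases hc : e.1 < p.1
    · refine ⟨0, by simp, ?_, ?_⟩
      · intro i; simp [xfindA, hc]
      · simp [hc] at h; simp [← h]
    · simp only [if_neg hc, Option.map_eq_some_iff] at h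
      obtain ⟨r', hr', hmap⟩ := h
      obtain ⟨j, hj, hfind, hr⟩ := ih r' hr'
      refine ⟨j + 1, by simpa using Nat.succ_le_succ hj, ?_, ?_⟩
      · intro i
        simp only [xfindA, if_neg hc, hfind (i + 1)]
        push_cast; ring
      · subst hmap hr; simp

theorem xinsert_spec' (smlpts : List (Int × Int)) (elemt : Int × Int) (fil : Bool) (k : Int) :
    xinsert smlpts elemt fil k = xinsert_alt smlpts elemt fil k := by
  unfold xinsert xinsert_alt
  cases hg : goB elemt smlpts with
  | none =>
    have h1 := xfindA_of_goB_none elemt smlpts hg 0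
    simp only [h1]
    cases fil <;> simp
  | some r =>
    obtain ⟨j, hj, hfind, hr⟩ := xfindA_of_goB_some elemt smlpts r hg
    have h0 : xfindA elemt.1 smlpts 0 = (j : Int) := by simpa using hfind 0
    have hne : ¬ ((j : Int) == -1 && fil == false) = true := by
      simp only [Bool.and_eq_true, beq_iff_eq]
      rintro ⟨h, -⟩; omega
    simp only [h0, hne, if_pos (by positivity : (0:Int) ≤ (j:Int))]
    rw [PySem.List.insert_natCast smlpts j elemt hj, ← hr]
    simp

-- ===== VERDICT (by name: the statement is the Claim_ definition above) =====
theorem xinsert_spec : Claim_equal_xinsert := by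
  intro smlpts elemt fil k _
  unfold Spec_xinsert
  exact xinsert_spec' smlpts elemt fil k
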